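-- pv_equiv track=rewrite | github.com/XyzHuy/-DL-Fine-tuning-coding-model | data/solution/Solution2832.py | maximumLengthOfRanges
-- ===== SOURCE A (Python) =====
-- from typing import List
--
-- def maximumLengthOfRanges(nums: List[int]) -> List[int]:
--     n = len(nums)
--     next_greater = [n] * n
--     prev_greater = [-1] * n
--
--     # Find the next greater element for each element
--     stack = []
--     for i in range(n):
--         while stack and nums[stack[-1]] < nums[i]:
--             next_greater[stack.pop()] = i
--         stack.append(i)
--
--     # Find the previous greater element for each element
--     stack = []
--     for i in range(n - 1, -1, -1):
--         while stack and nums[stack[-1]] < nums[i]: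
--             prev_greater[stack.pop()] = i
--         stack.append(i)
--
--     # Calculate the maximum length of ranges
--     ans = [0] * n
--     for i in range(n):
--         ans[i] = next_greater[i] - prev_greater[i] - 1
--
--     return ans
-- ===== SOURCE B (Python) =====
-- def maximumLengthOfRanges(nums):
--     n = len(nums)
--     ans = []
--     for i, v in enumerate(nums):
--         left = i - 1
--         while left >= 0 and nums[left] <= v:
--             left -= 1
--         right = i + 1
--         while right < n and nums[right] <= v:
--             right += 1
--         ans.append(right - left - 1)
--     return ans
-- ===== Notes on version B (the rewrite author's own statement) =====
-- stated objective: simpler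
-- what changed: Replaced the two monotonic-stack passes and the final assembly loop by a single pass that, for each index, expands left and right pointers past values <= nums[i] to the first strictly greater element on each side.
import Mathlib
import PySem

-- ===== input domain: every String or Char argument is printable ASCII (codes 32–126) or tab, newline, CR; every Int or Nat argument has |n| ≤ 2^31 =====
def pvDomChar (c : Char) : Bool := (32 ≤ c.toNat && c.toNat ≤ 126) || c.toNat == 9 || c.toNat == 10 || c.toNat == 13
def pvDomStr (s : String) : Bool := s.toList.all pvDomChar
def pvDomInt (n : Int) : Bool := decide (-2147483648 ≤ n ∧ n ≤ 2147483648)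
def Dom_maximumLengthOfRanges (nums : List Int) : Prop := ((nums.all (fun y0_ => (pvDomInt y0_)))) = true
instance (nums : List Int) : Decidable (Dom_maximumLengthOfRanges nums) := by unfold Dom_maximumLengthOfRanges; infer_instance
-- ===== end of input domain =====

-- B replaces A's two monotonic-stack passes by a direct per-index two-pointer expansion: simpler, not faster.

-- ===== PORT A =====
-- the inner `while stack and nums[stack[-1]] < nums[i]` pop loop (stack top = list head)
def pvPop (nums : List Int) (i : Nat) (arr : List Int) : List Nat → List Int × List Nat
  | [] => (arr, [])
  | j :: s =>
    if nums.getD j 0 < nums.getD i 0 then pvPop nums i (arr.set j (i : Int)) s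
    else (arr, j :: s)

-- one iteration of either stack pass: pop, then push i
def pvStep (nums : List Int) (st : List Int × List Nat) (i : Nat) : List Int × List Nat :=
  let p := pvPop nums i st.1 st.2
  (p.1, i :: p.2)

def maximumLengthOfRanges (nums : List Int) : List Int :=
  let n := nums.length
  let ng := ((List.range n).foldl (pvStep nums) (List.replicate n (n : Int), [])).1
  let pg := ((List.range n).reverse.foldl (pvStep nums) (List.replicate n (-1 : Int), [])).1
  (List.range n).foldl (fun a i => a.set i (ng.getD i 0 - pg.getD i 0 - 1)) (List.replicate n 0)

-- ===== PORT B =====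
-- `while left >= 0 and nums[left] <= v: left -= 1`, argument = left+1 (so 0 ↦ left = -1)
def pvLeft (nums : List Int) (v : Int) : Nat → Int
  | 0 => -1
  | j + 1 => if nums.getD j 0 ≤ v then pvLeft nums v j else (j : Int)

-- `while right < n and nums[right] <= v: right += 1`
def pvRight (nums : List Int) (v : Int) (k : Nat) : Nat :=
  if h : k < nums.length then
    (if nums.getD k 0 ≤ v then pvRight nums v (k + 1) else k)
  else k
termination_by nums.length - k

def maximumLengthOfRanges_alt (nums : List Int) : List Int :=
  (List.range nums.length).map (fun i =>
    let v := nums.getD i 0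
    (pvRight nums v (i + 1) : Int) - pvLeft nums v i - 1)

-- ===== PRECONDITION & SPEC =====
def Spec_maximumLengthOfRanges (nums : List Int) (out : List Int) : Prop := out = maximumLengthOfRanges_alt nums
instance (nums : List Int) (out : List Int) : Decidable (Spec_maximumLengthOfRanges nums out) := by unfold Spec_maximumLengthOfRanges; infer_instance

-- ===== CLAIM (what is proved, stated in full; the proofs are below) =====
def Claim_equal_maximumLengthOfRanges : Prop := ∀ (nums : List Int), Dom_maximumLengthOfRanges nums → Spec_maximumLengthOfRanges nums (maximumLengthOfRanges nums)

-- ===== LEMMAS AND PROOFS =====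

theorem pv_getD_set_eq (l : List Int) (i : Nat) (v : Int) (h : i < l.length) :
    (l.set i v).getD i 0 = v := by
  simp [List.getD, h]

theorem pv_getD_set_ne (l : List Int) (i j : Nat) (v : Int) (h : i ≠ j) :
    (l.set i v).getD j 0 = l.getD j 0 := by
  simp [List.getD, h]


-- invariant of the first (next-greater) pass after processing indices < m
def Inv1 (nums : List Int) (m : Nat) (arr : List Int) (s : List Nat) : Prop :=
  arr.length = nums.length ∧
  (∀ j ∈ s, j < m) ∧
  s.Pairwise (· > ·) ∧
  s.Pairwise (fun a b => nums.getD a 0 ≤ nums.getD b 0) ∧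
  (∀ j, m ≤ j → j < nums.length → arr.getD j 0 = (nums.length : Int)) ∧
  (∀ j ∈ s, arr.getD j 0 = (nums.length : Int) ∧
    ∀ k, j < k → k < m → nums.getD k 0 ≤ nums.getD j 0) ∧
  (∀ j, j < m → j ∉ s → ∃ k, j < k ∧ k < m ∧ nums.getD j 0 < nums.getD k 0 ∧
    arr.getD j 0 = (k : Int) ∧ ∀ l, j < l → l < k → nums.getD l 0 ≤ nums.getD j 0)

-- invariant of the second (prev-greater) pass after processing indices ≥ m
def Inv2 (nums : List Int) (m : Nat) (arr : List Int) (s : List Nat) : Prop :=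
  arr.length = nums.length ∧
  (∀ j ∈ s, m ≤ j ∧ j < nums.length) ∧
  s.Pairwise (· < ·) ∧
  s.Pairwise (fun a b => nums.getD a 0 ≤ nums.getD b 0) ∧
  (∀ j, j < m → arr.getD j 0 = (-1 : Int)) ∧
  (∀ j ∈ s, arr.getD j 0 = (-1 : Int) ∧
    ∀ k, m ≤ k → k < j → nums.getD k 0 ≤ nums.getD j 0) ∧
  (∀ j, m ≤ j → j < nums.length → j ∉ s → ∃ k, k < j ∧ m ≤ k ∧
    nums.getD j 0 < nums.getD k 0 ∧
    arr.getD j 0 = (k : Int) ∧ ∀ l, k < l → l < j → nums.getD l 0 ≤ nums.getD j 0)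

theorem pvPop_inv1 (nums : List Int) (m : Nat) (hm : m < nums.length) :
    ∀ (s : List Nat) (arr : List Int),
      arr.length = nums.length →
      (∀ j ∈ s, j < m) →
      s.Pairwise (· > ·) →
      s.Pairwise (fun a b => nums.getD a 0 ≤ nums.getD b 0) →
      (∀ j, m ≤ j → j < nums.length → arr.getD j 0 = (nums.length : Int)) →
      (∀ j ∈ s, arr.getD j 0 = (nums.length : Int) ∧
        ∀ k, j < k → k < m → nums.getD k 0 ≤ nums.getD j 0) →
      (∀ j, j < m → j ∉ s → ∃ k, j < k ∧ k < m + 1 ∧ nums.getD j 0 < nums.getD k 0 ∧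
        arr.getD j 0 = (k : Int) ∧ ∀ l, j < l → l < k → nums.getD l 0 ≤ nums.getD j 0) →
      Inv1 nums (m + 1) (pvPop nums m arr s).1 (m :: (pvPop nums m arr s).2) := by
  intro s
  induction s with
  | nil =>
    intro arr Hlen Hlt Hord Hval Hnew Hstk Hdone
    simp only [pvPop]
    refine ⟨Hlen, ?_, by simp, by simp, ?_, ?_, ?_⟩
    · intro j hj; simp at hj; omega
    · intro j hj1 hj2; exact Hnew j (by omega) hj2
    · intro j hj; simp at hj
      rw [hj]
      exact ⟨Hnew m le_rfl hm, fun k hk1 hk2 => by omega⟩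
    · intro j hj1 hj2
      have hjm : j < m := by
        simp at hj2; omega
      exact Hdone j hjm (by simp)
  | cons j0 rest ih =>
    intro arr Hlen Hlt Hord Hval Hnew Hstk Hdone
    rw [pvPop]
    by_cases hc : nums.getD j0 0 < nums.getD m 0
    · rw [if_pos hc]
      have hj0m : j0 < m := Hlt j0 (by simp)
      apply ih
      · simpa using Hlen
      · exact fun j hj => Hlt j (by simp [hj])
      · exact Hord.of_cons
      · exact Hval.of_cons
      · intro j hj1 hj2
        rw [pv_getD_set_ne _ _ _ _ (by omega)]
        exact Hnew j hj1 hj2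
      · intro j hj
        have hne : j0 ≠ j := by
          have := List.rel_of_pairwise_cons Hord hj
          omega
        rw [pv_getD_set_ne _ _ _ _ hne]
        exact Hstk j (by simp [hj])
      · intro j hj1 hj2
        by_cases hjj : j = j0
        · subst hjj
          refine ⟨m, hj0m, by omega, hc, ?_, (Hstk j (by simp)).2⟩
          exact pv_getD_set_eq _ _ _ (by omega)
        · obtain ⟨k, hk⟩ := Hdone j hj1 (by simp [hjj, hj2])
          exact ⟨k, hk.1, hk.2.1, hk.2.2.1, by
            rw [pv_getD_set_ne _ _ _ _ (Ne.symm hjj)]; exact hk.2.2.2.1, hk.2.2.2.2⟩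
    · rw [if_neg hc]
      have hmle : ∀ x ∈ j0 :: rest, nums.getD m 0 ≤ nums.getD x 0 := by
        intro x hx
        rcases List.mem_cons.mp hx with h | h
        · subst h; omega
        · exact le_trans (by omega) (List.rel_of_pairwise_cons Hval h)
      refine ⟨Hlen, ?_, ?_, ?_, ?_, ?_, ?_⟩
      · intro j hj
        rcases List.mem_cons.mp hj with h | h
        · omega
        · have := Hlt j h; omega
      · exact List.pairwise_cons.mpr ⟨fun j hj => Hlt j hj, Hord⟩
      · exact List.pairwise_cons.mpr ⟨hmle, Hval⟩
      · intro j hj1 hj2; exact Hnew j (by omega) hj2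
      · intro j hj
        rcases List.mem_cons.mp hj with h | h
        · rw [h]
          exact ⟨Hnew m le_rfl hm, fun k hk1 hk2 => by omega⟩
        · refine ⟨(Hstk j h).1, fun k hk1 hk2 => ?_⟩
          rcases Nat.lt_or_ge k m with hkm | hkm
          · exact (Hstk j h).2 k hk1 hkm
          · have : k = m := by omega
            subst this
            exact hmle j h
      · intro j hj1 hj2
        have hjne : j ≠ m := fun h => hj2 (h ▸ List.mem_cons_self)
        have hjm : j < m := by omega
        exact Hdone j hjm (fun h => hj2 (List.mem_cons_of_mem _ h))

theorem pvPop_inv2 (nums : List Int) (m : Nat) (hm : m < nums.length) :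
    ∀ (s : List Nat) (arr : List Int),
      arr.length = nums.length →
      (∀ j ∈ s, m < j ∧ j < nums.length) →
      s.Pairwise (· < ·) →
      s.Pairwise (fun a b => nums.getD a 0 ≤ nums.getD b 0) →
      (∀ j, j < m + 1 → arr.getD j 0 = (-1 : Int)) →
      (∀ j ∈ s, arr.getD j 0 = (-1 : Int) ∧
        ∀ k, m < k → k < j → nums.getD k 0 ≤ nums.getD j 0) →
      (∀ j, m < j → j < nums.length → j ∉ s → ∃ k, k < j ∧ m ≤ k ∧
        nums.getD j 0 < nums.getD k 0 ∧
        arr.getD j 0 = (k : Int) ∧ ∀ l, k < l → l < j → nums.getD l 0 ≤ nums.getD j 0) →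
      Inv2 nums m (pvPop nums m arr s).1 (m :: (pvPop nums m arr s).2) := by
  intro s
  induction s with
  | nil =>
    intro arr Hlen Hlt Hord Hval Hnew Hstk Hdone
    simp only [pvPop]
    refine ⟨Hlen, ?_, by simp, by simp, ?_, ?_, ?_⟩
    · intro j hj; simp at hj; omega
    · intro j hj; exact Hnew j (by omega)
    · intro j hj; simp at hj
      rw [hj]
      exact ⟨Hnew m (by omega), fun k hk1 hk2 => by omega⟩
    · intro j hj1 hj2 hj3
      have hjm : m < j := by
        have : j ≠ m := by simpa using hj3
        omega
      exact Hdone j hjm hj2 (by simp)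
  | cons j0 rest ih =>
    intro arr Hlen Hlt Hord Hval Hnew Hstk Hdone
    rw [pvPop]
    by_cases hc : nums.getD j0 0 < nums.getD m 0
    · rw [if_pos hc]
      have hj0m : m < j0 ∧ j0 < nums.length := Hlt j0 (by simp)
      apply ih
      · simpa using Hlen
      · exact fun j hj => Hlt j (by simp [hj])
      · exact Hord.of_cons
      · exact Hval.of_cons
      · intro j hj1
        rw [pv_getD_set_ne _ _ _ _ (by omega)]
        exact Hnew j hj1
      · intro j hj
        have hne : j0 ≠ j := by
          have := List.rel_of_pairwise_cons Hord hj
          omega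
        rw [pv_getD_set_ne _ _ _ _ hne]
        exact Hstk j (by simp [hj])
      · intro j hj1 hj2 hj3
        by_cases hjj : j = j0
        · subst hjj
          refine ⟨m, hj0m.1, le_rfl, hc, ?_, (Hstk j (by simp)).2⟩
          exact pv_getD_set_eq _ _ _ (by omega)
        · obtain ⟨k, hk⟩ := Hdone j hj1 hj2 (by simp [hjj, hj3])
          exact ⟨k, hk.1, hk.2.1, hk.2.2.1, by
            rw [pv_getD_set_ne _ _ _ _ (Ne.symm hjj)]; exact hk.2.2.2.1, hk.2.2.2.2⟩
    · rw [if_neg hc]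
      have hmle : ∀ x ∈ j0 :: rest, nums.getD m 0 ≤ nums.getD x 0 := by
        intro x hx
        rcases List.mem_cons.mp hx with h | h
        · rw [h]; omega
        · exact le_trans (by omega) (List.rel_of_pairwise_cons Hval h)
      refine ⟨Hlen, ?_, ?_, ?_, ?_, ?_, ?_⟩
      · intro j hj
        rcases List.mem_cons.mp hj with h | h
        · constructor <;> omega
        · have := Hlt j h; omega
      · exact List.pairwise_cons.mpr ⟨fun j hj => (Hlt j hj).1, Hord⟩
      · exact List.pairwise_cons.mpr ⟨hmle, Hval⟩
      · intro j hj; exact Hnew j (by omega)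
      · intro j hj
        rcases List.mem_cons.mp hj with h | h
        · rw [h]
          exact ⟨Hnew m (by omega), fun k hk1 hk2 => by omega⟩
        · refine ⟨(Hstk j h).1, fun k hk1 hk2 => ?_⟩
          rcases Nat.lt_or_ge m k with hkm | hkm
          · exact (Hstk j h).2 k hkm hk2
          · have : k = m := by omega
            rw [this]
            exact hmle j h
      · intro j hj1 hj2 hj3
        have hjne : j ≠ m := fun h => hj3 (h ▸ List.mem_cons_self)
        have hjm : m < j := by omega
        exact Hdone j hjm hj2 (fun h => hj3 (List.mem_cons_of_mem _ h))

theorem pass1_inv (nums : List Int) :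
    ∀ m, m ≤ nums.length →
      Inv1 nums m
        (((List.range m).foldl (pvStep nums)
          (List.replicate nums.length (nums.length : Int), [])).1)
        (((List.range m).foldl (pvStep nums)
          (List.replicate nums.length (nums.length : Int), [])).2) := by
  intro m
  induction m with
  | zero =>
    intro _
    simp only [List.range_zero, List.foldl_nil]
    refine ⟨by simp, by simp, by simp, by simp, ?_, by simp, ?_⟩
    · intro j _ hj2
      simp [List.getD, hj2]
    · intro j hj
      omega
  | succ m ih =>
    intro hm1
    have hm : m < nums.length := by omega
    obtain ⟨H1, H2, H3, H4, H5, H6, H7⟩ := ih (by omega)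
    rw [List.range_succ, List.foldl_append, List.foldl_cons, List.foldl_nil]
    simp only [pvStep]
    exact pvPop_inv1 nums m hm _ _ H1 H2 H3 H4 H5 H6
      (fun j hj hjs => (H7 j hj hjs).imp (fun k hk => ⟨hk.1, by omega, hk.2.2⟩))

theorem pass2_inv (nums : List Int) :
    ∀ d, d ≤ nums.length →
      Inv2 nums (nums.length - d)
        ((((List.range' (nums.length - d) d).reverse).foldl (pvStep nums)
          (List.replicate nums.length (-1 : Int), [])).1)
        ((((List.range' (nums.length - d) d).reverse).foldl (pvStep nums)
          (List.replicate nums.length (-1 : Int), [])).2) := by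
  intro d
  induction d with
  | zero =>
    intro _
    simp only [List.range'_zero, List.reverse_nil, List.foldl_nil]
    refine ⟨by simp, by simp, by simp, by simp, ?_, by simp, ?_⟩
    · intro j hj
      have hj' : j < nums.length := by omega
      simp [List.getD, hj']
    · intro j hj1 hj2
      omega
  | succ d ih =>
    intro hd1
    have hmdef : nums.length - d = (nums.length - (d + 1)) + 1 := by omega
    have hm : nums.length - (d + 1) < nums.length := by omega
    obtain ⟨H1, H2, H3, H4, H5, H6, H7⟩ := ih (by omega)
    rw [hmdef] at H1 H2 H3 H4 H5 H6 H7
    rw [List.range'_succ, List.reverse_cons, List.foldl_append, List.foldl_cons,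
      List.foldl_nil]
    simp only [pvStep]
    refine pvPop_inv2 nums _ hm _ _ H1 (fun j hj => ⟨by have := H2 j hj; omega,
      (H2 j hj).2⟩) H3 H4 H5 ?_ ?_
    · intro j hj
      exact ⟨(H6 j hj).1, fun k hk1 hk2 => (H6 j hj).2 k (by omega) hk2⟩
    · intro j hj1 hj2 hj3
      obtain ⟨k, hk⟩ := H7 j (by omega) hj2 hj3
      exact ⟨k, hk.1, by omega, hk.2.2⟩

-- characterizations of B's pointer loops
theorem pvRight_eq (nums : List Int) (v : Int) :
    ∀ (d a k : Nat), a + d = k → k ≤ nums.length →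
      (∀ l, a ≤ l → l < k → nums.getD l 0 ≤ v) →
      (k = nums.length ∨ v < nums.getD k 0) →
      pvRight nums v a = k := by
  intro d
  induction d with
  | zero =>
    intro a k hak hk hbelow hstop
    have hka : k = a := by omega
    rw [hka] at hstop ⊢
    rw [pvRight]
    rcases Nat.lt_or_ge a nums.length with ha | ha
    · have hv : v < nums.getD a 0 := by
        rcases hstop with h | h
        · omega
        · exact h
      rw [dif_pos ha, if_neg (not_le.mpr hv)]
    · rw [dif_neg (by omega)]
  | succ d ih =>
    intro a k hak hk hbelow hstop
    have ha : a < nums.length := by omega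
    rw [pvRight]
    simp only [ha, dif_pos]
    rw [if_pos (hbelow a le_rfl (by omega))]
    exact ih (a+1) k (by omega) hk (fun l hl1 hl2 => hbelow l (by omega) hl2) hstop

theorem pvLeft_eq_neg (nums : List Int) (v : Int) :
    ∀ i, (∀ l, l < i → nums.getD l 0 ≤ v) → pvLeft nums v i = -1 := by
  intro i
  induction i with
  | zero => intro _; rfl
  | succ j ih =>
    intro h
    rw [pvLeft, if_pos (h j (by omega))]
    exact ih (fun l hl => h l (by omega))

theorem pvLeft_eq (nums : List Int) (v : Int) :
    ∀ i j, j < i → v < nums.getD j 0 →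
      (∀ l, j < l → l < i → nums.getD l 0 ≤ v) →
      pvLeft nums v i = (j : Int) := by
  intro i
  induction i with
  | zero => intro j h; omega
  | succ i' ih =>
    intro j hj hv hbetween
    rw [pvLeft]
    rcases Nat.lt_or_ge j i' with hji | hji
    · rw [if_pos (hbetween i' (by omega) (by omega))]
      exact ih j hji hv (fun l h1 h2 => hbetween l h1 (by omega))
    · have : j = i' := by omega
      subst this
      rw [if_neg (by omega)]

-- pointwise description of A's final assembly loop
theorem foldl_set_length (f : Nat → Int) :
    ∀ (l : List Nat) (a : List Int),
      (l.foldl (fun a i => a.set i (f i)) a).length = a.length := by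
  intro l
  induction l with
  | nil => intro a; rfl
  | cons i l ih =>
    intro a
    simp [List.foldl, ih, List.length_set]

theorem foldl_set_getD (f : Nat → Int) :
    ∀ (l : List Nat) (a : List Int) (j : Nat),
      (l.foldl (fun a i => a.set i (f i)) a).getD j 0 =
        if j ∈ l ∧ j < a.length then f j else a.getD j 0 := by
  intro l
  induction l with
  | nil => intro a j; simp
  | cons i l ih =>
    intro a j
    rw [List.foldl_cons, ih]
    by_cases hjl : j ∈ l
    · simp only [hjl, true_and, List.length_set, List.mem_cons, or_true]
      split_ifs with h
      · rfl
      · have hle := Nat.le_of_not_lt h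
        rw [List.getD_eq_getElem?_getD, List.getD_eq_getElem?_getD,
          List.getElem?_eq_none (show (a.set i (f i)).length ≤ j by simpa using hle),
          List.getElem?_eq_none hle]
    · by_cases hji : j = i
      · subst hji
        by_cases hlen : j < a.length
        · rw [if_neg (by simp [hjl]), if_pos (by simp [hlen])]
          exact pv_getD_set_eq _ _ _ hlen
        · have hle := Nat.le_of_not_lt hlen
          rw [if_neg (fun h => hlen (by simpa using h.2)),
            if_neg (fun h => hlen h.2)]
          rw [List.getD_eq_getElem?_getD, List.getD_eq_getElem?_getD,
            List.getElem?_eq_none (show (a.set j (f j)).length ≤ j by simpa using hle),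
            List.getElem?_eq_none hle]
      · rw [if_neg (by simp [hjl]), if_neg (by simp [hjl, hji])]
        exact pv_getD_set_ne _ _ _ _ (Ne.symm hji)

-- ===== VERDICT (by name: the statement is the Claim_ definition above) =====
theorem maximumLengthOfRanges_spec : Claim_equal_maximumLengthOfRanges := by
  intro nums _
  show _ = _
  unfold maximumLengthOfRanges maximumLengthOfRanges_alt
  obtain ⟨A1, A2, A3, A4, A5, A6, A7⟩ := pass1_inv nums nums.length le_rfl
  have h2 := pass2_inv nums nums.length le_rfl
  rw [Nat.sub_self, ← List.range_eq_range'] at h2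
  obtain ⟨B1, B2, B3, B4, B5, B6, B7⟩ := h2
  apply List.ext_getElem
  · rw [foldl_set_length]
    simp
  · intro i hi1 hi2
    have hin : i < nums.length := by
      simpa using hi2
    rw [← List.getD_eq_getElem _ 0 hi1, ← List.getD_eq_getElem _ 0 hi2,
      List.getD_eq_getElem _ 0 hi2, List.getElem_map, List.getElem_range,
      foldl_set_getD]
    rw [if_pos ⟨List.mem_range.mpr hin, by simpa using hin⟩]
    have hng : (((List.range nums.length).foldl (pvStep nums)
        (List.replicate nums.length (nums.length : Int), [])).1).getD i 0 =
        ((pvRight nums (nums.getD i 0) (i + 1) : Nat) : Int) := by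
      by_cases hs : i ∈ ((List.range nums.length).foldl (pvStep nums)
          (List.replicate nums.length (nums.length : Int), [])).2
      · obtain ⟨he, hb⟩ := A6 i hs
        rw [he, pvRight_eq nums _ (nums.length - (i + 1)) (i + 1) nums.length
          (by omega) le_rfl (fun l hl1 hl2 => hb l (by omega) hl2) (Or.inl rfl)]
      · obtain ⟨k, hk1, hk2, hk3, hk4, hk5⟩ := A7 i hin hs
        rw [hk4, pvRight_eq nums _ (k - (i + 1)) (i + 1) k (by omega) (by omega)
          (fun l hl1 hl2 => hk5 l (by omega) hl2) (Or.inr hk3)]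
    have hpg : (((List.range nums.length).reverse.foldl (pvStep nums)
        (List.replicate nums.length (-1 : Int), [])).1).getD i 0 =
        pvLeft nums (nums.getD i 0) i := by
      by_cases hs : i ∈ ((List.range nums.length).reverse.foldl (pvStep nums)
          (List.replicate nums.length (-1 : Int), [])).2
      · obtain ⟨he, hb⟩ := B6 i hs
        rw [he, pvLeft_eq_neg nums _ i (fun l hl => hb l (by omega) hl)]
      · obtain ⟨k, hk1, hk2, hk3, hk4, hk5⟩ := B7 i (by omega) hin hs
        rw [hk4, pvLeft_eq nums _ i k hk1 hk3 (fun l hl1 hl2 => hk5 l hl1 hl2)]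
    rw [hng, hpg]
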